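-- pv_equiv track=rewrite | github.com/MagnusAagaard/ludo_game_AI | genetic_algorithm.py | get_safe_pieces
-- ===== SOURCE A (Python) =====
-- def get_safe_pieces(player_pieces, enemy_pieces):
-- 	safe_spots = [0, 1, 9, 14, 22, 27, 35, 48, 53, 54, 55, 56, 57, 58, 59]
-- 	safe_pieces = 0
-- 	for i in range(len(player_pieces)-1):
-- 		for j in range(i+1,len(player_pieces)):
-- 			if player_pieces[i] == player_pieces[j] and player_pieces[i] not in safe_spots:
-- 				safe_spots.append(player_pieces[i])
--
-- 	for piece in player_pieces:
-- 		for spot in safe_spots: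
-- 			# if piece is on safe spot which is not home
-- 			if piece == spot and spot != 0:
-- 				safe_pieces += 1
-- 	return safe_spots, safe_pieces
-- ===== SOURCE B (Python) =====
-- def get_safe_pieces(player_pieces, enemy_pieces):
--     counts = {}
--     for p in player_pieces:
--         counts[p] = counts.get(p, 0) + 1
--     safe_spots = [0, 1, 9, 14, 22, 27, 35, 48, 53, 54, 55, 56, 57, 58, 59]
--     for p in player_pieces:
--         if counts[p] >= 2 and p not in safe_spots:
--             safe_spots.append(p)
--     safe_pieces = sum(1 for p in player_pieces if p != 0 and p in safe_spots)
--     return safe_spots, safe_pieces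
-- ===== Notes on version B (the rewrite author's own statement) =====
-- stated objective: faster
-- what changed: Replaces the O(n^2) nested pairwise duplicate scan with a one-pass frequency dict (append a position at its first occurrence when its total count is >= 2), and replaces the nested piece-by-spot counting loop with a single membership count over the pieces.
import Mathlib
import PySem

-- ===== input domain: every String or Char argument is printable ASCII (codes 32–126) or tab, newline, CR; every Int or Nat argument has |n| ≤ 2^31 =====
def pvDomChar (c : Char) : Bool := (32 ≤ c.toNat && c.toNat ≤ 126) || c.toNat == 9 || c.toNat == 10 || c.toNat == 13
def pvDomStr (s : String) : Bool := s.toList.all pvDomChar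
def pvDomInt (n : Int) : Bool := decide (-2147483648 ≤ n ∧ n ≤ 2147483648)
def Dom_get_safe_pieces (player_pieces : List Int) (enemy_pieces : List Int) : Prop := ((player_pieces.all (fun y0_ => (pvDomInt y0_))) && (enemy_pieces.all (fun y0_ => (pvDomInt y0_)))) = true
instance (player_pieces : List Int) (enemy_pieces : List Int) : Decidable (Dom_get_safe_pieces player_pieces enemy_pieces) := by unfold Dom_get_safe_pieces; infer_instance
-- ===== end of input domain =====

-- B replaces A's quadratic pairwise duplicate scan by a one-pass frequency table and the
-- nested piece-by-spot counting by a single membership count (objective: faster, constant-factor).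

-- ===== PORT A =====
def get_safe_pieces (player_pieces : List Int) (enemy_pieces : List Int) : List Int × Int :=
  let safe_spots : List Int := [0, 1, 9, 14, 22, 27, 35, 48, 53, 54, 55, 56, 57, 58, 59]
  let safe_spots :=
    (PySem.List.pyRange 0 ((player_pieces.length : Int) - 1) 1).foldl (fun ss i =>
      (PySem.List.pyRange (i + 1) (player_pieces.length : Int) 1).foldl (fun ss j =>
        if PySem.List.pyGetD player_pieces i 0 = PySem.List.pyGetD player_pieces j 0 ∧
           PySem.List.pyGetD player_pieces i 0 ∉ ss
        then ss ++ [PySem.List.pyGetD player_pieces i 0] else ss) ss) safe_spots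
  let safe_pieces : Int :=
    player_pieces.foldl (fun acc piece =>
      safe_spots.foldl (fun acc spot => if piece = spot ∧ spot ≠ 0 then acc + 1 else acc) acc) 0
  (safe_spots, safe_pieces)

-- ===== PORT B =====
def get_safe_pieces_alt (player_pieces : List Int) (enemy_pieces : List Int) : List Int × Int :=
  let counts : PySem.Dict Int Int :=
    player_pieces.foldl (fun d p => d.insert p (d.getD p 0 + 1)) PySem.Dict.empty
  let safe_spots : List Int := [0, 1, 9, 14, 22, 27, 35, 48, 53, 54, 55, 56, 57, 58, 59]
  let safe_spots :=
    player_pieces.foldl (fun ss p => if 2 ≤ counts.getD p 0 ∧ p ∉ ss then ss ++ [p] else ss)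
      safe_spots
  let safe_pieces : Int :=
    (player_pieces.countP (fun p => p ≠ 0 ∧ p ∈ safe_spots) : Nat)
  (safe_spots, safe_pieces)

-- ===== PRECONDITION & SPEC =====
def Spec_get_safe_pieces (player_pieces : List Int) (enemy_pieces : List Int) (out : List Int × Int) : Prop := out = get_safe_pieces_alt player_pieces enemy_pieces
instance (player_pieces : List Int) (enemy_pieces : List Int) (out : List Int × Int) : Decidable (Spec_get_safe_pieces player_pieces enemy_pieces out) := by unfold Spec_get_safe_pieces; infer_instance

-- ===== CLAIM (what is proved, stated in full; the proofs are below) =====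
def Claim_equal_get_safe_pieces : Prop := ∀ (player_pieces : List Int) (enemy_pieces : List Int), Dom_get_safe_pieces player_pieces enemy_pieces → Spec_get_safe_pieces player_pieces enemy_pieces (get_safe_pieces player_pieces enemy_pieces)

-- ===== LEMMAS AND PROOFS =====

-- A's structural first phase: process each piece with its tail (append on a later duplicate).
def pvLoopA : List Int → List Int → List Int
  | [], ss => ss
  | x :: t, ss => pvLoopA t (if x ∈ t ∧ x ∉ ss then ss ++ [x] else ss)

-- A's inner j-loop over a tail appends v at most once.
theorem pvInner (v : Int) (ys : List Int) (ss : List Int) :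
    ys.foldl (fun ss y => if v = y ∧ v ∉ ss then ss ++ [v] else ss) ss
      = if v ∈ ys ∧ v ∉ ss then ss ++ [v] else ss := by
  induction ys generalizing ss with
  | nil => simp
  | cons y t ih =>
    simp only [List.foldl_cons, ih, List.mem_cons]
    by_cases hv : v ∈ ss
    · simp [hv]
    · by_cases hy : v = y
      · subst hy; simp [hv]
      · simp [hy, hv]

-- pvLoopA does nothing on a list of length at most one
theorem pvLoopA_short (l : List Int) (ss : List Int) (h : l.length ≤ 1) : pvLoopA l ss = ss := by
  match l, h with
  | [], _ => rfl
  | [x], _ => simp [pvLoopA]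

-- fuel-indexed form of the index-loop reduction
theorem pvAloopFuel (pp : List Int) : ∀ (m k : Nat) (ss : List Int), pp.length ≤ k + m →
    (PySem.List.pyRange (k : Int) ((pp.length : Int) - 1) 1).foldl (fun ss i =>
      (PySem.List.pyRange (i + 1) (pp.length : Int) 1).foldl (fun ss j =>
        if PySem.List.pyGetD pp i 0 = PySem.List.pyGetD pp j 0 ∧
           PySem.List.pyGetD pp i 0 ∉ ss
        then ss ++ [PySem.List.pyGetD pp i 0] else ss) ss) ss
      = pvLoopA (pp.drop k) ss := by
  intro m
  induction m with
  | zero =>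
    intro k ss hm
    rw [PySem.List.pyRange_one_eq_nil (by omega), List.foldl_nil,
        List.drop_eq_nil_of_le (by omega), pvLoopA]
  | succ m ih =>
    intro k ss hm
    by_cases hk : (k : Int) < (pp.length : Int) - 1
    · have hkl : k + 1 < pp.length := by omega
      rw [PySem.List.pyRange_one_cons hk]
      simp only [List.foldl_cons]
      have h1 : ((k : Int) + 1) = ((k + 1 : Nat) : Int) := by push_cast; ring
      rw [h1, PySem.List.foldl_pyRange_pyGetD' pp 0
            (fun ss y => if PySem.List.pyGetD pp ((k : Nat) : Int) 0 = y ∧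
                PySem.List.pyGetD pp ((k : Nat) : Int) 0 ∉ ss
              then ss ++ [PySem.List.pyGetD pp ((k : Nat) : Int) 0] else ss) ss
            (by positivity)]
      rw [Int.toNat_natCast, pvInner]
      rw [PySem.List.pyGetD_natCast, List.getD_eq_getElem pp 0 (by omega)]
      rw [List.drop_eq_getElem_cons (by omega : k < pp.length), pvLoopA]
      exact ih (k + 1) _ (by omega)
    · rw [PySem.List.pyRange_one_eq_nil (by omega), List.foldl_nil,
          pvLoopA_short _ _ (by simp; omega)]

-- counting version equals the structural loop under the prefix invariant
theorem pvBloop (xs : List Int) : ∀ (pref ss : List Int),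
    (∀ p, p ∈ pref → p ∈ xs → p ∈ ss) →
    pvLoopA xs ss
      = xs.foldl (fun ss p => if 2 ≤ ((pref ++ xs).count p : Int) ∧ p ∉ ss then ss ++ [p] else ss) ss := by
  induction xs with
  | nil => intro _ _ _; rfl
  | cons x t ih =>
    intro pref ss hinv
    simp only [pvLoopA, List.foldl_cons]
    have hstep : (if x ∈ t ∧ x ∉ ss then ss ++ [x] else ss)
        = (if 2 ≤ ((pref ++ x :: t).count x : Int) ∧ x ∉ ss then ss ++ [x] else ss) := by
      by_cases hvs : x ∈ ss
      · simp [hvs]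
      · have hxp : x ∉ pref := fun hp => hvs (hinv x hp (by simp))
        have hc : (pref ++ x :: t).count x = t.count x + 1 := by
          simp [List.count_append, List.count_eq_zero_of_not_mem hxp]
        rw [hc]
        by_cases hxt : x ∈ t
        · have : 1 ≤ t.count x := List.one_le_count_iff.mpr hxt
          simp [hxt, hvs]
          omega
        · simp [hxt, hvs, List.count_eq_zero_of_not_mem hxt]
    rw [hstep]
    set ss' := if 2 ≤ ((pref ++ x :: t).count x : Int) ∧ x ∉ ss then ss ++ [x] else ss with hss'
    have hsub : ∀ q, q ∈ ss → q ∈ ss' := by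
      intro q hq; rw [hss']; split_ifs <;> simp [hq]
    have hinv' : ∀ p, p ∈ pref ++ [x] → p ∈ t → p ∈ ss' := by
      intro p hp hpt
      rcases List.mem_append.mp hp with hp | hp
      · exact hsub _ (hinv p hp (by simp [hpt]))
      · have hpx : p = x := by simpa using hp
        subst hpx
        rw [hss']
        by_cases hvs : p ∈ ss
        · split_ifs <;> simp [hvs]
        · have h2 : 2 ≤ ((pref ++ p :: t).count p : Int) := by
            have h3 : 1 ≤ t.count p := List.one_le_count_iff.mpr hpt
            have h4 : (pref ++ p :: t).count p = pref.count p + (t.count p + 1) := by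
              simp [List.count_append]
            omega
          rw [if_pos ⟨h2, hvs⟩]
          simp
    have := ih (pref ++ [x]) ss' hinv'
    rw [List.append_assoc] at this
    simpa using this

-- fold of the append-if-new shape keeps Nodup
theorem pvNodup (P : Int → Prop) [DecidablePred P] (xs : List Int) : ∀ (ss : List Int), ss.Nodup →
    (xs.foldl (fun ss p => if P p ∧ p ∉ ss then ss ++ [p] else ss) ss).Nodup := by
  induction xs with
  | nil => intro ss h; simpa using h
  | cons x t ih =>
    intro ss h
    simp only [List.foldl_cons]
    split_ifs with hc
    · apply ih
      have hx : ∀ a ∈ ss, ¬a = x := fun a ha he => hc.2 (he ▸ ha)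
      simp [List.nodup_append, h]
      exact hx
    · exact ih _ h

-- A's second phase on a Nodup spot list is a membership count.
theorem pvPhase2 (pp spots : List Int) (hnd : spots.Nodup) :
    pp.foldl (fun acc piece =>
      spots.foldl (fun acc spot => if piece = spot ∧ spot ≠ 0 then acc + 1 else acc) acc) 0
      = ((pp.countP (fun p => p ≠ 0 ∧ p ∈ spots) : Nat) : Int) := by
  have inner : ∀ (acc : Int) (piece : Int),
      spots.foldl (fun acc spot => if piece = spot ∧ spot ≠ 0 then acc + 1 else acc) acc
        = if piece ≠ 0 ∧ piece ∈ spots then acc + 1 else acc := by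
    intro acc piece
    rw [PySem.List.foldl_ite_add_one (fun spot => piece = spot ∧ spot ≠ 0) spots acc]
    by_cases h0 : piece = 0
    · simp [h0]
      exact fun a _ h => h.symm
    · have hcong : spots.countP (fun spot => decide (piece = spot ∧ spot ≠ 0))
          = spots.count piece := by
        rw [List.count]
        apply List.countP_congr
        intro a _
        by_cases ha : a = piece
        · subst ha; simp [h0]
        · have hne : ¬(piece = a) := fun h => ha h.symm
          simp [ha, hne]
      by_cases hm : piece ∈ spots
      · rw [hcong, List.count_eq_one_of_mem hnd hm]
        simp [h0, hm]
      · rw [hcong, List.count_eq_zero_of_not_mem hm]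
        simp [h0, hm]
  simp only [inner]
  rw [PySem.List.foldl_ite_add_one (fun piece => piece ≠ 0 ∧ piece ∈ spots) pp 0]
  simp

-- ===== VERDICT (by name: the statement is the Claim_ definition above) =====
theorem get_safe_pieces_spec : Claim_equal_get_safe_pieces := by
  intro pp ep _
  unfold Spec_get_safe_pieces get_safe_pieces get_safe_pieces_alt
  dsimp only
  have hcounts : ∀ p : Int,
      (pp.foldl (fun d p => d.insert p (d.getD p 0 + 1)) PySem.Dict.empty).getD p 0
        = ((pp.count p : Nat) : Int) := by
    intro p
    rw [PySem.Dict.getD_foldl_insert_add_one, PySem.Dict.getD_empty]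
    ring
  simp only [hcounts]
  have base_nodup : ([0, 1, 9, 14, 22, 27, 35, 48, 53, 54, 55, 56, 57, 58, 59] : List Int).Nodup := by decide
  have hA := pvAloopFuel pp pp.length 0 ([0, 1, 9, 14, 22, 27, 35, 48, 53, 54, 55, 56, 57, 58, 59] : List Int) (by omega)
  have hAB := pvBloop pp ([] : List Int) ([0, 1, 9, 14, 22, 27, 35, 48, 53, 54, 55, 56, 57, 58, 59] : List Int) (by simp)
  simp only [List.nil_append] at hAB
  have hspots : (PySem.List.pyRange 0 ((pp.length : Int) - 1) 1).foldl (fun ss i =>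
      (PySem.List.pyRange (i + 1) (pp.length : Int) 1).foldl (fun ss j =>
        if PySem.List.pyGetD pp i 0 = PySem.List.pyGetD pp j 0 ∧
           PySem.List.pyGetD pp i 0 ∉ ss
        then ss ++ [PySem.List.pyGetD pp i 0] else ss) ss)
        ([0, 1, 9, 14, 22, 27, 35, 48, 53, 54, 55, 56, 57, 58, 59] : List Int)
      = pp.foldl (fun ss p => if 2 ≤ ((pp.count p : Nat) : Int) ∧ p ∉ ss then ss ++ [p] else ss)
        ([0, 1, 9, 14, 22, 27, 35, 48, 53, 54, 55, 56, 57, 58, 59] : List Int) := by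
    norm_num at hA
    exact hA.trans hAB
  rw [hspots]
  have hnd := pvNodup (fun p => 2 ≤ ((pp.count p : Nat) : Int)) pp
      ([0, 1, 9, 14, 22, 27, 35, 48, 53, 54, 55, 56, 57, 58, 59] : List Int) base_nodup
  rw [pvPhase2 pp _ hnd]
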